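-- pv_equiv track=rewrite | github.com/NoamAriel/bioinformatic_silk | libraries/amino_acid_group_motifs.py | characterize_sequence
-- ===== SOURCE A (Python) =====
-- from typing import Any, Dict, Iterable, List, Mapping, Optional, Sequence, Tuple
--
-- DEFAULT_GROUPS: Dict[str, Sequence[str]] = {
--     "π": ["A", "V", "L", "I", "M", "P"],  # nonpolar
--     "α": ["F", "W", "Y"],  # aromatic
--     "η": ["S", "T"],  # hydroxyl
--     "θ": ["C", "N", "Q", "G"],  # polar
--     "ψ": ["D", "E"],  # negative charged
--     "φ": ["K", "R", "H"],  # positive charged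
-- }
--
-- def build_aa_to_groups(groups: Mapping[str, Iterable[str]]) -> Dict[str, List[str]]:
--     """Build a mapping of amino-acid letter -> list of group names."""
--     aa_to_groups: Dict[str, List[str]] = {}
--     for group_name, letters in groups.items():
--         for letter in letters:
--             up = str(letter).upper()
--             aa_to_groups.setdefault(up, []).append(group_name)
--     return aa_to_groups
--
-- def characterize_sequence(
--     seq: str,
--     groups: Mapping[str, Iterable[str]] | None = None,
--     multi_group_joiner: str = "|",
--     unknown_label: str = "unknown",
-- ) -> List[str]:
--     """
--     Return per-residue group labels for a sequence.
--
--     If a residue belongs to multiple groups (e.g., Y), the labels are joined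
--     with `multi_group_joiner`.
--     """
--     group_map = build_aa_to_groups(groups or DEFAULT_GROUPS)
--     labels: List[str] = []
--     for ch in seq:
--         if not ch.isalpha():
--             continue
--         up = ch.upper()
--         hit = group_map.get(up)
--         if not hit:
--             labels.append(unknown_label)
--         elif len(hit) == 1:
--             labels.append(hit[0])
--         else:
--             labels.append(multi_group_joiner.join(hit))
--     return labels
-- ===== SOURCE B (Python) =====
-- from typing import Dict, Iterable, Mapping, List, Sequence
--
-- DEFAULT_GROUPS: Dict[str, Sequence[str]] = {
--     "π": ["A", "V", "L", "I", "M", "P"],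
--     "α": ["F", "W", "Y"],
--     "η": ["S", "T"],
--     "θ": ["C", "N", "Q", "G"],
--     "ψ": ["D", "E"],
--     "φ": ["K", "R", "H"],
-- }
--
-- def characterize_sequence(
--     seq: str,
--     groups: "Mapping[str, Iterable[str]] | None" = None,
--     multi_group_joiner: str = "|",
--     unknown_label: str = "unknown",
-- ) -> List[str]:
--     """Per-residue group labels: scan the groups table directly per residue,
--     no intermediate letter->groups index."""
--     items = list((groups or DEFAULT_GROUPS).items())
--     labels: List[str] = []
--     for ch in seq:
--         if not ch.isalpha():
--             continue
--         up = ch.upper()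
--         hit = [name for name, letters in items
--                     for letter in letters if str(letter).upper() == up]
--         labels.append(multi_group_joiner.join(hit) if hit else unknown_label)
--     return labels
-- ===== Notes on version B (the rewrite author's own statement) =====
-- stated objective: simpler
-- what changed: Drops the build_aa_to_groups letter->groups index entirely: B scans the groups table directly for each residue with a comprehension and joins the hits (empty -> unknown), removing the helper, the setdefault dict and the three-way branch.
import Mathlib
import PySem

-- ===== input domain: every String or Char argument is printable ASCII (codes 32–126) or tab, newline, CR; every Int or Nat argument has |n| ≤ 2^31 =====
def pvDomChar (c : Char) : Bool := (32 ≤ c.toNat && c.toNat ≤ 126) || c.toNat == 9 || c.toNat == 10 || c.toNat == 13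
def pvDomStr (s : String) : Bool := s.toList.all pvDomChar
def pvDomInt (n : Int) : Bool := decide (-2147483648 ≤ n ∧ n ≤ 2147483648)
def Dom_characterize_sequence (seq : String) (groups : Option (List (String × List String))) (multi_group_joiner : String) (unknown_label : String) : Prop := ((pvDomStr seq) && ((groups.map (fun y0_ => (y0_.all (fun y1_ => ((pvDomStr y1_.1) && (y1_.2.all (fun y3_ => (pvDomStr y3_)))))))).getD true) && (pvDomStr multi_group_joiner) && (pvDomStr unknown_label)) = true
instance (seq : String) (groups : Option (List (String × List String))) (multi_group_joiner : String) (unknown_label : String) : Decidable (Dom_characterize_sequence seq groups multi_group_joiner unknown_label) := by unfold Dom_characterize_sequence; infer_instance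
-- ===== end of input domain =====

-- B removes the build_aa_to_groups index: it scans the groups table per residue and joins the hits; objective: simpler.


-- ===== PORT A =====
-- DEFAULT_GROUPS (insertion order of the Python dict literal)
def pvDefaultGroups : List (String × List String) :=
  [("π", ["A","V","L","I","M","P"]), ("α", ["F","W","Y"]), ("η", ["S","T"]),
   ("θ", ["C","N","Q","G"]), ("ψ", ["D","E"]), ("φ", ["K","R","H"])]

-- `groups or DEFAULT_GROUPS`, then the Mapping's items() (the caller's dict: duplicate
-- keys in the association list collapse as in Python's dict construction)
def pvEffGroups (groups : Option (List (String × List String))) : List (String × List String) :=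
  match groups with
  | none => pvDefaultGroups
  | some [] => pvDefaultGroups
  | some l => (PySem.Dict.ofList l).items

def build_aa_to_groups (groups : List (String × List String)) : PySem.Dict String (List String) :=
  groups.foldl (fun d p =>
    p.2.foldl (fun d letter =>
      let up := PySem.Str.upper letter
      -- aa_to_groups.setdefault(up, []).append(group_name)
      d.insert up (d.getD up [] ++ [p.1])) d) PySem.Dict.empty

def characterize_sequence (seq : String) (groups : Option (List (String × List String))) (multi_group_joiner : String) (unknown_label : String) : List String :=
  let group_map := build_aa_to_groups (pvEffGroups groups)
  seq.toList.foldl (fun labels ch =>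
    if !(PySem.Chars.isalpha ch) then labels
    else
      let up := String.mk [PySem.Chars.upperChar ch]
      match group_map.get? up with
      | none => labels ++ [unknown_label]
      | some [] => labels ++ [unknown_label]
      | some [x] => labels ++ [x]
      | some hit => labels ++ [PySem.Str.join multi_group_joiner hit]) []

-- ===== PORT B =====
def characterize_sequence_alt (seq : String) (groups : Option (List (String × List String))) (multi_group_joiner : String) (unknown_label : String) : List String :=
  let items := pvEffGroups groups
  (seq.toList.filter PySem.Chars.isalpha).map (fun ch =>
    let up := String.mk [PySem.Chars.upperChar ch]
    let hit := items.flatMap (fun p => (p.2.filter (fun l => PySem.Str.upper l = up)).map (fun _ => p.1))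
    if hit = [] then unknown_label else PySem.Str.join multi_group_joiner hit)

-- ===== PRECONDITION & SPEC =====
def Spec_characterize_sequence (seq : String) (groups : Option (List (String × List String))) (multi_group_joiner : String) (unknown_label : String) (out : List String) : Prop := out = characterize_sequence_alt seq groups multi_group_joiner unknown_label
instance (seq : String) (groups : Option (List (String × List String))) (multi_group_joiner : String) (unknown_label : String) (out : List String) : Decidable (Spec_characterize_sequence seq groups multi_group_joiner unknown_label out) := by unfold Spec_characterize_sequence; infer_instance

-- ===== CLAIM (what is proved, stated in full; the proofs are below) =====
def Claim_equal_characterize_sequence : Prop := ∀ (seq : String) (groups : Option (List (String × List String))) (multi_group_joiner : String) (unknown_label : String), Dom_characterize_sequence seq groups multi_group_joiner unknown_label → Spec_characterize_sequence seq groups multi_group_joiner unknown_label (characterize_sequence seq groups multi_group_joiner unknown_label)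

-- ===== LEMMAS AND PROOFS =====

-- hits of a key in the groups table, in table order (B's per-residue comprehension)
def pvHits (gs : List (String × List String)) (up : String) : List String :=
  gs.flatMap (fun p => (p.2.filter (fun l => PySem.Str.upper l = up)).map (fun _ => p.1))

theorem getD_letters_fold (letters : List String) (gn : String)
    (d : PySem.Dict String (List String)) (s : String) :
    (letters.foldl (fun d letter =>
        d.insert (PySem.Str.upper letter) (d.getD (PySem.Str.upper letter) [] ++ [gn])) d).getD s []
      = d.getD s [] ++ ((letters.filter (fun l => PySem.Str.upper l = s)).map (fun _ => gn)) := by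
  induction letters generalizing d with
  | nil => simp
  | cons l ls ih =>
    simp only [List.foldl_cons, List.filter_cons]
    rw [ih]
    by_cases h : PySem.Str.upper l = s
    · rw [h, PySem.Dict.getD_insert_self]
      simp
    · rw [PySem.Dict.getD_insert_of_ne _ _ _ (fun hc => h hc.symm)]
      simp [h]

theorem getD_build (gs : List (String × List String)) (d : PySem.Dict String (List String)) (s : String) :
    (gs.foldl (fun d p =>
        p.2.foldl (fun d letter =>
          d.insert (PySem.Str.upper letter) (d.getD (PySem.Str.upper letter) [] ++ [p.1])) d) d).getD s []
      = d.getD s [] ++ pvHits gs s := by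
  induction gs generalizing d with
  | nil => simp [pvHits]
  | cons g rest ih =>
    simp only [List.foldl_cons]
    rw [ih, getD_letters_fold]
    simp [pvHits, List.append_assoc]

theorem getD_build_aa (gs : List (String × List String)) (s : String) :
    (build_aa_to_groups gs).getD s [] = pvHits gs s := by
  have h := getD_build gs PySem.Dict.empty s
  simpa [build_aa_to_groups] using h

theorem join_singleton_str (sep x : String) : PySem.Str.join sep [x] = x := by
  simp [PySem.Str.join, PySem.Chars.join_singleton]

-- A's loop body equals the 'append f ch when alpha' shape with B's per-residue label
theorem stepA_eq (gs : List (String × List String)) (mgj unk : String)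
    (labels : List String) (ch : Char) :
    (if (!PySem.Chars.isalpha ch) = true then labels
     else
       match (build_aa_to_groups gs).get? (String.mk [PySem.Chars.upperChar ch]) with
       | none => labels ++ [unk]
       | some [] => labels ++ [unk]
       | some [x] => labels ++ [x]
       | some hit => labels ++ [PySem.Str.join mgj hit])
      = (if PySem.Chars.isalpha ch = true then
           labels ++ [if pvHits gs (String.mk [PySem.Chars.upperChar ch]) = [] then unk
                      else PySem.Str.join mgj (pvHits gs (String.mk [PySem.Chars.upperChar ch]))]
         else labels) := by
  cases hα : PySem.Chars.isalpha ch
  · simp [hα]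
  · simp only [Bool.not_true, Bool.false_eq_true, if_false, if_true]
    have hg : ((build_aa_to_groups gs).get? (String.mk [PySem.Chars.upperChar ch])).getD []
        = pvHits gs (String.mk [PySem.Chars.upperChar ch]) := by
      rw [← PySem.Dict.getD_eq_get?_getD]
      exact getD_build_aa gs _
    cases hget : (build_aa_to_groups gs).get? (String.mk [PySem.Chars.upperChar ch]) with
    | none =>
      rw [hget] at hg
      simp only [Option.getD_none] at hg
      simp [← hg]
    | some hit =>
      rw [hget] at hg
      simp only [Option.getD_some] at hg
      rw [← hg]
      match hit with
      | [] => simp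
      | [x] => simp [join_singleton_str]
      | a :: b :: t => simp

-- ===== VERDICT (by name: the statement is the Claim_ definition above) =====
theorem characterize_sequence_spec : Claim_equal_characterize_sequence := by
  intro seq groups mgj unk _
  unfold Spec_characterize_sequence characterize_sequence characterize_sequence_alt
  simp only []
  have hfun : (fun (labels : List String) (ch : Char) =>
      if (!PySem.Chars.isalpha ch) = true then labels
      else
        match (build_aa_to_groups (pvEffGroups groups)).get? (String.mk [PySem.Chars.upperChar ch]) with
        | none => labels ++ [unk]
        | some [] => labels ++ [unk]
        | some [x] => labels ++ [x]
        | some hit => labels ++ [PySem.Str.join mgj hit])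
      = (fun (labels : List String) (ch : Char) =>
          if PySem.Chars.isalpha ch = true then
            labels ++ [if pvHits (pvEffGroups groups) (String.mk [PySem.Chars.upperChar ch]) = [] then unk
                       else PySem.Str.join mgj (pvHits (pvEffGroups groups) (String.mk [PySem.Chars.upperChar ch]))]
          else labels) := by
    funext labels ch
    exact stepA_eq (pvEffGroups groups) mgj unk labels ch
  rw [hfun]
  rw [PySem.List.foldl_append_if]
  simp [pvHits]
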